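-- pv_equiv track=rewrite | github.com/alscovidny/tetrika | task3.py | rm_nested_segments
-- ===== SOURCE A (Python) =====
-- from operator import itemgetter
-- import itertools
--
-- def rm_nested_segments(segm): # nested segments - вложенные отрезки
--     cuts = sorted([[segm[i], segm[i+1]] for i in range(0, len(segm) - 1, 2)], key=itemgetter(0))
--     indxs = set()
--     for i in range(len(cuts)):
--         for j in range(i+1,len(cuts)):
--             if cuts[i][1] >= cuts[j][1]:
--                 indxs.add(j)
--     for j in sorted(list(indxs), reverse=True):
--         cuts.remove(cuts[j])
--     return list(itertools.chain(*cuts))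
-- ===== SOURCE B (Python) =====
-- def rm_nested_segments(segm):  # nested segments - keep only non-nested ones
--     pairs = sorted(((segm[i], segm[i + 1]) for i in range(0, len(segm) - 1, 2)),
--                    key=lambda p: p[0])
--     out = []
--     best = None  # max right endpoint seen so far
--     for s, e in pairs:
--         if best is None or e > best:
--             out.append(s)
--             out.append(e)
--             best = e
--     return out
-- ===== Notes on version B (the rewrite author's own statement) =====
-- stated objective: faster
-- what changed: Replaces A's quadratic all-pairs marking loop plus the remove-by-value deletion pass with a single linear sweep over the start-sorted segments that keeps a segment exactly when its right endpoint exceeds the running maximum.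
-- outside the precondition, e.g. on rm_nested_segments([0, 5, 0, 3, 0, 5]): A returns [0, 3], B returns [0, 5]
import Mathlib
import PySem

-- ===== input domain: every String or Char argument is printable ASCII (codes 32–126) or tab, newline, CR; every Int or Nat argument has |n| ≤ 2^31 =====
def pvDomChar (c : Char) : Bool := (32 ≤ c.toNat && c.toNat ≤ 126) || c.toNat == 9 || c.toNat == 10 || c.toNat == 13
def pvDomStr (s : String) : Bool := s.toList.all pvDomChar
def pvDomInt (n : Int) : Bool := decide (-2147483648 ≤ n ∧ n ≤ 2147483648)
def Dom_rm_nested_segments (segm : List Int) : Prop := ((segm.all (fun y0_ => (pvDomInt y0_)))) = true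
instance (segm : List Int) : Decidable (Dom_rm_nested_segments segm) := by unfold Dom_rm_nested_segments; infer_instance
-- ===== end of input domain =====

-- B replaces A's quadratic all-pairs nesting scan + remove-by-value pass with one
-- linear running-maximum sweep over the start-sorted segments (objective: faster).

-- ===== PORT A =====
-- cuts = sorted([[segm[i], segm[i+1]] for i in range(0, len(segm) - 1, 2)], key=itemgetter(0))
-- indxs = set(); double loop marking j with cuts[i][1] >= cuts[j][1]; then
-- for j in sorted(list(indxs), reverse=True): cuts.remove(cuts[j]); return chain(*cuts).
-- (list(indxs) has unspecified iteration order in Python, but it is immediately sorted,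
-- so sorting the PySem.Set — which holds the same distinct elements — is exact.)
-- The indexings cuts[i], cuts[j], and the .remove, can never raise (indices produced by
-- range / kept below the shrinking length), so pyGetD/getD defaults are unreachable.
def rm_nested_segments (segm : List Int) : List Int :=
  let cuts : List (Int × Int) :=
    PySem.List.sorted
      ((PySem.List.pyRange 0 ((segm.length : Int) - 1) 2).map
        (fun i => (PySem.List.pyGetD segm i 0, PySem.List.pyGetD segm (i + 1) 0)))
      (fun p => p.1)
  let indxs : PySem.Set Int :=
    (PySem.List.pyRange 0 (cuts.length : Int) 1).foldl
      (fun s i =>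
        (PySem.List.pyRange (i + 1) (cuts.length : Int) 1).foldl
          (fun s j =>
            if (PySem.List.pyGetD cuts i (0, 0)).2 ≥ (PySem.List.pyGetD cuts j (0, 0)).2
            then PySem.Set.add s j else s)
          s)
      PySem.Set.empty
  let cuts2 : List (Int × Int) :=
    (PySem.List.sorted indxs (fun x => x) true).foldl
      (fun L j => (PySem.List.remove? L (PySem.List.pyGetD L j (0, 0))).getD L) cuts
  cuts2.flatMap (fun p => [p.1, p.2])

-- ===== PORT B =====
-- pairs = sorted-by-start pairs; single pass: keep a pair iff its end exceeds the
-- running maximum 'best' (None initially); out accumulates the flattened kept pairs.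
def rm_nested_segments_alt (segm : List Int) : List Int :=
  let pairs : List (Int × Int) :=
    PySem.List.sorted
      ((PySem.List.pyRange 0 ((segm.length : Int) - 1) 2).map
        (fun i => (PySem.List.pyGetD segm i 0, PySem.List.pyGetD segm (i + 1) 0)))
      (fun p => p.1)
  (pairs.foldl
    (fun (st : List Int × Option Int) p =>
      match st.2 with
      | none => (st.1 ++ [p.1, p.2], some p.2)
      | some best => if best < p.2 then (st.1 ++ [p.1, p.2], some p.2) else st)
    ([], none)).1

-- ===== PRECONDITION & SPEC =====
-- Pre_ excludes inputs containing the same (start, end) segment twice: there A's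
-- remove-by-value pass can delete a different equal copy and cascade into removing
-- segments that were never marked as nested — a value no direct implementation of
-- the task reproduces; B simply keeps the outermost segments.  (The list below is
-- just the input chunked into its consecutive (start, end) pairs.)
def Pre_rm_nested_segments (segm : List Int) : Prop :=
  (((PySem.List.pyRange 0 ((segm.length : Int) - 1) 2).map
    (fun i => (PySem.List.pyGetD segm i 0, PySem.List.pyGetD segm (i + 1) 0)))).Nodup
instance (segm : List Int) : Decidable (Pre_rm_nested_segments segm) := by
  unfold Pre_rm_nested_segments; infer_instance

def pvWitness_rm_nested_segments : List Int := [1, 10, 2, 5, 6, 7]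

def Spec_rm_nested_segments (segm : List Int) (out : List Int) : Prop := out = rm_nested_segments_alt segm
instance (segm : List Int) (out : List Int) : Decidable (Spec_rm_nested_segments segm out) := by unfold Spec_rm_nested_segments; infer_instance

-- ===== CLAIM (what is proved, stated in full; the proofs are below) =====
def Claim_equal_rm_nested_segments : Prop := ∀ (segm : List Int), Dom_rm_nested_segments segm → Pre_rm_nested_segments segm → Spec_rm_nested_segments segm (rm_nested_segments segm)

-- ===== LEMMAS AND PROOFS =====

-- proof-side: filter a list by a predicate on positions (first position = k)
def pvIdxKeep : List (Int × Int) → Nat → (Nat → Bool) → List (Int × Int)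
  | [], _, _ => []
  | p :: l, k, P => if P k then p :: pvIdxKeep l (k + 1) P else pvIdxKeep l (k + 1) P

-- proof-side: "position k is a strict record of right endpoints" — the common spec
def pvKeepSpec (cs : List (Int × Int)) (k : Nat) : Bool :=
  decide (∀ q ∈ cs.take k, q.2 < (cs.getD k (0, 0)).2)

-- proof-side: B's sweep on pairs, stripped of the flattening accumulator
def pvRunKeep : List (Int × Int) → Option Int → List (Int × Int)
  | [], _ => []
  | p :: l, none => p :: pvRunKeep l (some p.2)
  | p :: l, some b => if b < p.2 then p :: pvRunKeep l (some p.2) else pvRunKeep l (some b)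

-- proof-side: running maximum of right endpoints (none on [])
def pvMaxEnd? : List (Int × Int) → Option Int
  | [] => none
  | p :: l => some (l.foldl (fun m q => max m q.2) p.2)

theorem pvIdxKeep_congr (l : List (Int × Int)) (k : Nat) (P Q : Nat → Bool)
    (h : ∀ m, k ≤ m → m < k + l.length → P m = Q m) :
    pvIdxKeep l k P = pvIdxKeep l k Q := by
  induction l generalizing k with
  | nil => rfl
  | cons p l ih =>
    simp only [pvIdxKeep]
    rw [h k le_rfl (by simp), ih (k+1) (fun m h1 h2 => h m (by omega) (by simp at h2 ⊢; omega))]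

theorem pvIdxKeep_all (l : List (Int × Int)) (k : Nat) (P : Nat → Bool)
    (h : ∀ m, k ≤ m → P m = true) : pvIdxKeep l k P = l := by
  induction l generalizing k with
  | nil => rfl
  | cons p l ih => simp only [pvIdxKeep, h k le_rfl, if_true, ih (k+1) (fun m hm => h m (by omega))]

theorem pvIdxKeep_append (l1 l2 : List (Int × Int)) (k : Nat) (P : Nat → Bool) :
    pvIdxKeep (l1 ++ l2) k P = pvIdxKeep l1 k P ++ pvIdxKeep l2 (k + l1.length) P := by
  induction l1 generalizing k with
  | nil => simp [pvIdxKeep]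
  | cons p l ih =>
    simp only [List.cons_append, pvIdxKeep, ih (k+1), List.length_cons]
    split <;> simp [Nat.add_assoc, Nat.add_comm 1]

theorem pvMaxEnd?_eq_none_iff (l : List (Int × Int)) : pvMaxEnd? l = none ↔ l = [] := by
  cases l <;> simp [pvMaxEnd?]

theorem pvMaxEnd?_append_singleton (l : List (Int × Int)) (p : Int × Int) :
    pvMaxEnd? (l ++ [p]) = some (match pvMaxEnd? l with | none => p.2 | some b => max b p.2) := by
  cases l with
  | nil => simp [pvMaxEnd?]
  | cons q l => simp [pvMaxEnd?, List.foldl_append]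

theorem pvFoldlMax_lt (l : List (Int × Int)) (a e : Int) :
    l.foldl (fun m q => max m q.2) a < e ↔ a < e ∧ ∀ q ∈ l, q.2 < e := by
  induction l generalizing a with
  | nil => simp
  | cons q l ih =>
    simp only [List.foldl_cons, ih, max_lt_iff, List.mem_cons]
    constructor
    · rintro ⟨⟨h1, h2⟩, h3⟩
      exact ⟨h1, fun r hr => hr.elim (fun he => he ▸ h2) (h3 r)⟩
    · rintro ⟨h1, h2⟩
      exact ⟨⟨h1, h2 q (Or.inl rfl)⟩, fun r hr => h2 r (Or.inr hr)⟩

theorem pvMaxEnd?_lt_iff (l : List (Int × Int)) (b e : Int) (h : pvMaxEnd? l = some b) :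
    (b < e ↔ ∀ q ∈ l, q.2 < e) := by
  cases l with
  | nil => simp [pvMaxEnd?] at h
  | cons p l =>
    simp only [pvMaxEnd?, Option.some.injEq] at h
    subst h
    rw [pvFoldlMax_lt]
    simp only [List.mem_cons]
    constructor
    · rintro ⟨h1, h2⟩ r hr
      exact hr.elim (fun he => he ▸ h1) (h2 r)
    · intro hall
      exact ⟨hall p (Or.inl rfl), fun r hr => hall r (Or.inr hr)⟩

-- A's marking: membership in the inner fold over j
theorem pvInnerFold_mem (cs : List (Int × Int)) (i : Int) (js : List Int)
    (s : PySem.Set Int) (x : Int) :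
    x ∈ js.foldl
        (fun s j => if (PySem.List.pyGetD cs i (0, 0)).2 ≥ (PySem.List.pyGetD cs j (0, 0)).2
                    then PySem.Set.add s j else s) s ↔
      x ∈ s ∨ (x ∈ js ∧ (PySem.List.pyGetD cs i (0, 0)).2 ≥ (PySem.List.pyGetD cs x (0, 0)).2) := by
  induction js generalizing s with
  | nil => simp
  | cons j js ih =>
    simp only [List.foldl_cons, ih, List.mem_cons]
    split_ifs with hc
    · by_cases hx : x = j
      · subst hx; simp [PySem.Set.mem_add, hc]; try tauto
      · simp [PySem.Set.mem_add, hx]; try tauto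
    · by_cases hx : x = j
      · subst hx; tauto
      · tauto

theorem pvOuterFoldAux (cs : List (Int × Int)) (n : Int) (is : List Int)
    (s : PySem.Set Int) (x : Int) :
    (x ∈ is.foldl
        (fun s i => (PySem.List.pyRange (i + 1) n 1).foldl
          (fun s j => if (PySem.List.pyGetD cs i (0, 0)).2 ≥ (PySem.List.pyGetD cs j (0, 0)).2
                      then PySem.Set.add s j else s) s) s) ↔
      x ∈ s ∨ ∃ i ∈ is, x ∈ PySem.List.pyRange (i + 1) n 1 ∧
        (PySem.List.pyGetD cs i (0, 0)).2 ≥ (PySem.List.pyGetD cs x (0, 0)).2 := by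
  induction is generalizing s with
  | nil => simp
  | cons i is ih =>
    simp only [List.foldl_cons, ih, pvInnerFold_mem, List.mem_cons]
    constructor
    · rintro (((h | ⟨h1, h2⟩) | ⟨i', hi', h1, h2⟩))
      · exact Or.inl h
      · exact Or.inr ⟨i, Or.inl rfl, h1, h2⟩
      · exact Or.inr ⟨i', Or.inr hi', h1, h2⟩
    · rintro (h | ⟨i', (rfl | hi'), h1, h2⟩)
      · exact Or.inl (Or.inl h)
      · exact Or.inl (Or.inr ⟨h1, h2⟩)
      · exact Or.inr ⟨i', hi', h1, h2⟩

-- A's marking: membership in the whole double fold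
theorem pvMark_mem (cs : List (Int × Int)) (x : Int) :
    (x ∈ (PySem.List.pyRange 0 (cs.length : Int) 1).foldl
        (fun s i => (PySem.List.pyRange (i + 1) (cs.length : Int) 1).foldl
          (fun s j => if (PySem.List.pyGetD cs i (0, 0)).2 ≥ (PySem.List.pyGetD cs j (0, 0)).2
                      then PySem.Set.add s j else s) s)
        PySem.Set.empty) ↔
      ∃ i : Int, 0 ≤ i ∧ i < x ∧ x < (cs.length : Int) ∧
        (PySem.List.pyGetD cs i (0, 0)).2 ≥ (PySem.List.pyGetD cs x (0, 0)).2 := by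
  rw [pvOuterFoldAux]
  simp only [PySem.Set.empty, List.not_mem_nil, false_or, PySem.List.mem_pyRange_one]
  constructor
  · rintro ⟨i, hi1, ⟨h1, h2⟩, h3⟩
    exact ⟨i, hi1.1, by omega, h2, h3⟩
  · rintro ⟨i, h0, h1, h2, h3⟩
    exact ⟨i, ⟨h0, by omega⟩, ⟨by omega, h2⟩, h3⟩

-- a fold of conditional Set.add keeps the set duplicate-free
theorem pvFold_add_nodup {β : Type} (f : PySem.Set Int → β → PySem.Set Int)
    (hf : ∀ s b, s.Nodup → (f s b).Nodup)
    (l : List β) (s : PySem.Set Int) (h : s.Nodup) : (l.foldl f s).Nodup := by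
  induction l generalizing s with
  | nil => exact h
  | cons b l ih => exact ih _ (hf _ _ h)

theorem pvSet_add_nodup (s : PySem.Set Int) (x : Int) (h : s.Nodup) :
    (PySem.Set.add s x).Nodup := by
  unfold PySem.Set.add
  split_ifs with hc
  · exact h
  · rw [List.nodup_append]
    refine ⟨h, List.nodup_singleton x, ?_⟩
    intro a ha b hb
    simp only [List.mem_singleton] at hb
    subst hb
    intro heq
    exact hc (by simpa using heq ▸ ha)

-- A's removal pass over strictly decreasing in-range indices, on a duplicate-free
-- list, keeps exactly the positions not listed
theorem pvRemoveFold (cs : List (Int × Int)) (ds : List Int)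
    (hnd : cs.Nodup) (hsort : ds.Pairwise (· > ·))
    (hbd : ∀ j ∈ ds, 0 ≤ j ∧ j < (cs.length : Int)) :
    ds.foldl (fun L j => (PySem.List.remove? L (PySem.List.pyGetD L j (0, 0))).getD L) cs
      = pvIdxKeep cs 0 (fun k => decide ((k : Int) ∉ ds)) := by
  induction ds generalizing cs with
  | nil =>
    simp only [List.foldl_nil]
    exact (pvIdxKeep_all cs 0 _ (by simp)).symm
  | cons j ds ih =>
    obtain ⟨hj0, hjlen⟩ := hbd j (by simp)
    obtain ⟨hgt, htail⟩ := List.pairwise_cons.mp hsort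
    have hjlt : j.toNat < cs.length := by omega
    have hjn : (j.toNat : Int) = j := Int.toNat_of_nonneg hj0
    have hget : PySem.List.pyGetD cs j (0, 0) = cs[j.toNat] :=
      PySem.List.pyGetD_eq_getElem cs (0, 0) hj0 hjlen
    have hrem : PySem.List.remove? cs (cs[j.toNat]) = some (cs.erase cs[j.toNat]) :=
      PySem.List.remove?_eq_some_erase cs _ (List.getElem_mem hjlt)
    have hsplit : cs = cs.take j.toNat ++ cs[j.toNat] :: cs.drop (j.toNat + 1) := by
      conv_lhs => rw [← List.take_append_drop j.toNat cs]
      rw [List.drop_eq_getElem_cons hjlt]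
    have hnotin : cs[j.toNat] ∉ cs.take j.toNat := by
      have hnd' := hnd
      rw [hsplit, List.nodup_append] at hnd'
      intro hmem
      exact (hnd'.2.2 _ hmem _ List.mem_cons_self) rfl
    have herase : cs.erase cs[j.toNat] = cs.take j.toNat ++ cs.drop (j.toNat + 1) := by
      calc cs.erase cs[j.toNat]
          = (cs.take j.toNat ++ cs[j.toNat] :: cs.drop (j.toNat + 1)).erase cs[j.toNat] := by
            rw [← hsplit]
        _ = cs.take j.toNat ++ (cs[j.toNat] :: cs.drop (j.toNat + 1)).erase cs[j.toNat] :=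
            List.erase_append_right _ hnotin
        _ = cs.take j.toNat ++ cs.drop (j.toNat + 1) := by rw [List.erase_cons_head]
    have hlen' : (cs.take j.toNat ++ cs.drop (j.toNat + 1)).length = cs.length - 1 := by
      simp [List.length_take, List.length_drop]
      omega
    have hnd2 : (cs.take j.toNat ++ cs.drop (j.toNat + 1)).Nodup := by
      rw [← herase]
      exact List.erase_sublist.nodup hnd
    have hbd2 : ∀ j' ∈ ds, 0 ≤ j' ∧ j' < ((cs.take j.toNat ++ cs.drop (j.toNat + 1)).length : Int) := by
      intro j' hj'
      have h1 := (hbd j' (List.mem_cons_of_mem _ hj')).1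
      have h2 := hgt j' hj'
      rw [hlen']
      omega
    have hstep : (PySem.List.remove? cs (PySem.List.pyGetD cs j (0, 0))).getD cs
        = cs.take j.toNat ++ cs.drop (j.toNat + 1) := by
      rw [hget, hrem, Option.getD_some, herase]
    rw [List.foldl_cons, hstep, ih _ hnd2 htail hbd2]
    -- now rewrite the right-hand side through the same split
    conv_rhs => rw [hsplit]
    rw [pvIdxKeep_append, pvIdxKeep_append]
    have hP0 : pvIdxKeep (cs.take j.toNat) 0 (fun k => decide ((k : Int) ∉ ds))
        = pvIdxKeep (cs.take j.toNat) 0 (fun k => decide ((k : Int) ∉ j :: ds)) := by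
      apply pvIdxKeep_congr
      intro m _ hm
      simp only [List.length_take, Nat.zero_add] at hm
      simp only [decide_eq_decide, List.mem_cons]
      have : (m : Int) ≠ j := by omega
      tauto
    have hdrop1 : pvIdxKeep (cs.drop (j.toNat + 1)) (0 + (cs.take j.toNat).length)
        (fun k => decide ((k : Int) ∉ ds)) = cs.drop (j.toNat + 1) := by
      apply pvIdxKeep_all
      intro m hm
      simp only [List.length_take, Nat.zero_add] at hm
      simp only [decide_eq_true_eq]
      intro hmem
      have := hgt _ hmem
      have hmin : j.toNat ≤ m := by
        have : min j.toNat cs.length = j.toNat := by omega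
        omega
      omega
    have hdrop2 : pvIdxKeep (cs[j.toNat] :: cs.drop (j.toNat + 1)) (0 + (cs.take j.toNat).length)
        (fun k => decide ((k : Int) ∉ j :: ds)) = cs.drop (j.toNat + 1) := by
      have hlt : (cs.take j.toNat).length = j.toNat := by
        simp [List.length_take]
        omega
      simp only [pvIdxKeep, Nat.zero_add, hlt]
      rw [if_neg (by simp [hjn])]
      apply pvIdxKeep_all
      intro m hm
      simp only [decide_eq_true_eq, List.mem_cons]
      rintro (heq | hmem)
      · omega
      · have := hgt _ hmem
        omega
    rw [hP0, hdrop1, hdrop2]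

-- B's sweep computes exactly the strict records of right endpoints
theorem pvRunKeep_spec (l pre : List (Int × Int)) :
    pvRunKeep l (pvMaxEnd? pre) = pvIdxKeep l pre.length (pvKeepSpec (pre ++ l)) := by
  induction l generalizing pre with
  | nil => simp [pvRunKeep, pvIdxKeep]
  | cons p rest ih =>
    have hget : (pre ++ p :: rest).getD pre.length (0, 0) = p := by
      rw [List.getD_eq_getElem?_getD, List.getElem?_append_right le_rfl]
      simp
    have htake : (pre ++ p :: rest).take pre.length = pre := by simp
    have hspec : pvKeepSpec (pre ++ p :: rest) pre.length = decide (∀ q ∈ pre, q.2 < p.2) := by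
      simp only [pvKeepSpec, htake, hget]
    have hassoc : pre ++ p :: rest = (pre ++ [p]) ++ rest := by simp
    have hlen : (pre ++ [p]).length = pre.length + 1 := by simp
    cases hpre : pvMaxEnd? pre with
    | none =>
      have hemp : pre = [] := (pvMaxEnd?_eq_none_iff pre).mp hpre
      subst hemp
      have hmax1 : pvMaxEnd? ([] ++ [p]) = some p.2 := by simp [pvMaxEnd?]
      simp only [pvRunKeep, pvIdxKeep, List.length_nil]
      rw [if_pos (by simp [pvKeepSpec])]
      have := ih ([] ++ [p])
      rw [hmax1] at this
      rw [this, hlen]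
      simp
    | some b =>
      have hiff := pvMaxEnd?_lt_iff pre b p.2 hpre
      have hmax : pvMaxEnd? (pre ++ [p]) = some (max b p.2) := by
        rw [pvMaxEnd?_append_singleton, hpre]
      by_cases hlt : b < p.2
      · have hkeep : pvKeepSpec (pre ++ p :: rest) pre.length = true := by
          rw [hspec, decide_eq_true_eq]
          exact hiff.mp hlt
        simp only [pvRunKeep, if_pos hlt, pvIdxKeep, hkeep]
        rw [if_pos trivial]
        have hmax2 : pvMaxEnd? (pre ++ [p]) = some p.2 := by
          rw [hmax, max_eq_right hlt.le]
        have := ih (pre ++ [p])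
        rw [hmax2, hlen] at this
        rw [hassoc, this]
      · have hkeep : pvKeepSpec (pre ++ p :: rest) pre.length = false := by
          rw [hspec, decide_eq_false_iff_not]
          intro hall
          exact hlt (hiff.mpr hall)
        simp only [pvRunKeep, if_neg hlt, pvIdxKeep, hkeep]
        rw [if_neg Bool.false_ne_true]
        have hmax2 : pvMaxEnd? (pre ++ [p]) = some b := by
          rw [hmax, max_eq_left (le_of_not_gt hlt)]
        have := ih (pre ++ [p])
        rw [hmax2, hlen] at this
        rw [hassoc, this]

-- B's fold, unfolded to the sweep
theorem pvAltFold (l : List (Int × Int)) (acc : List Int) (b : Option Int) :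
    (l.foldl
      (fun (st : List Int × Option Int) p =>
        match st.2 with
        | none => (st.1 ++ [p.1, p.2], some p.2)
        | some best => if best < p.2 then (st.1 ++ [p.1, p.2], some p.2) else st)
      (acc, b)).1 = acc ++ (pvRunKeep l b).flatMap (fun p => [p.1, p.2]) := by
  induction l generalizing acc b with
  | nil => simp [pvRunKeep]
  | cons p l ih =>
    cases b with
    | none => simp [pvRunKeep, List.foldl_cons, ih]
    | some best =>
      by_cases h : best < p.2 <;> simp [pvRunKeep, List.foldl_cons, h, ih]

-- the whole equivalence, for an arbitrary duplicate-free sorted pair list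
theorem pvMain (cs : List (Int × Int)) (hnd : cs.Nodup) :
    ((PySem.List.sorted
        ((PySem.List.pyRange 0 (cs.length : Int) 1).foldl
          (fun s i => (PySem.List.pyRange (i + 1) (cs.length : Int) 1).foldl
            (fun s j => if (PySem.List.pyGetD cs i (0, 0)).2 ≥ (PySem.List.pyGetD cs j (0, 0)).2
                        then PySem.Set.add s j else s) s)
          PySem.Set.empty) (fun x => x) true).foldl
        (fun L j => (PySem.List.remove? L (PySem.List.pyGetD L j (0, 0))).getD L) cs).flatMap
        (fun p => [p.1, p.2])
      = (cs.foldl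
          (fun (st : List Int × Option Int) p =>
            match st.2 with
            | none => (st.1 ++ [p.1, p.2], some p.2)
            | some best => if best < p.2 then (st.1 ++ [p.1, p.2], some p.2) else st)
          ([], none)).1 := by
  set mk := (PySem.List.pyRange 0 (cs.length : Int) 1).foldl
      (fun s i => (PySem.List.pyRange (i + 1) (cs.length : Int) 1).foldl
        (fun s j => if (PySem.List.pyGetD cs i (0, 0)).2 ≥ (PySem.List.pyGetD cs j (0, 0)).2
                    then PySem.Set.add s j else s) s)
      PySem.Set.empty with hmk
  set ds := PySem.List.sorted mk (fun x => x) true with hds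
  have hmem : ∀ x : Int, x ∈ ds ↔ ∃ i : Int, 0 ≤ i ∧ i < x ∧ x < (cs.length : Int) ∧
      (PySem.List.pyGetD cs i (0, 0)).2 ≥ (PySem.List.pyGetD cs x (0, 0)).2 := by
    intro x
    rw [hds, PySem.List.mem_sorted, hmk, pvMark_mem]
  have hmknd : mk.Nodup := by
    rw [hmk]
    apply pvFold_add_nodup
    · intro s i hs
      apply pvFold_add_nodup
      · intro s' j hs'
        split_ifs
        · exact pvSet_add_nodup _ _ hs'
        · exact hs'
      · exact hs
    · simp [PySem.Set.empty]
  have hdsnd : ds.Nodup := (PySem.List.sorted_perm mk (fun x => x) true).nodup_iff.mpr hmknd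
  have hdssort : ds.Pairwise (· > ·) := by
    have h1 := PySem.List.sorted_pairwise_rev mk (fun x => x)
    rw [← hds] at h1
    exact (h1.and hdsnd).imp (fun hab => lt_of_le_of_ne hab.1 hab.2.symm)
  have hbd : ∀ j ∈ ds, 0 ≤ j ∧ j < (cs.length : Int) := by
    intro j hj
    obtain ⟨i, h0, h1, h2, _⟩ := (hmem j).mp hj
    exact ⟨by omega, h2⟩
  rw [pvRemoveFold cs ds hnd hdssort hbd, pvAltFold cs [] none, List.nil_append]
  have hrun : pvRunKeep cs none = pvIdxKeep cs 0 (pvKeepSpec cs) := by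
    have h := pvRunKeep_spec cs []
    simpa using h
  rw [hrun]
  congr 1
  apply pvIdxKeep_congr
  intro m _ hm
  simp only [Nat.zero_add] at hm
  simp only [pvKeepSpec, decide_eq_decide]
  have hmlen : ((m : Int)) < (cs.length : Int) := by exact_mod_cast hm
  have hgetm : PySem.List.pyGetD cs (m : Int) (0, 0) = cs[m] := by
    rw [PySem.List.pyGetD_eq_getElem cs (0, 0) (by positivity) hmlen]
    simp
  have hgetDm : cs.getD m (0, 0) = cs[m] := List.getD_eq_getElem cs (0, 0) hm
  constructor
  · intro hnot q hq
    by_contra hge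
    apply hnot
    obtain ⟨i, hi, heq⟩ := List.mem_iff_getElem.mp hq
    have hi' : i < m := by
      simp [List.length_take] at hi
      omega
    refine (hmem (m : Int)).mpr ⟨(i : Int), by positivity, by exact_mod_cast hi', hmlen, ?_⟩
    have hgeti : PySem.List.pyGetD cs (i : Int) (0, 0) = cs[i] := by
      rw [PySem.List.pyGetD_eq_getElem cs (0, 0) (by positivity) (by exact_mod_cast (by omega : i < cs.length))]
      simp
    rw [hgeti, hgetm]
    have : (cs.take m)[i] = cs[i] := List.getElem_take
    rw [this] at heq
    rw [heq]
    rw [hgetDm] at hge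
    omega
  · intro hall hin
    obtain ⟨i, h0, h1, h2, hge⟩ := (hmem (m : Int)).mp hin
    have hilt : i.toNat < m := by omega
    have hilen : i.toNat < cs.length := by omega
    have hq : cs[i.toNat] ∈ cs.take m := by
      apply List.mem_iff_getElem.mpr
      refine ⟨i.toNat, by simp [List.length_take]; omega, ?_⟩
      exact List.getElem_take
    have := hall _ hq
    rw [hgetDm] at this
    have hgeti : PySem.List.pyGetD cs i (0, 0) = cs[i.toNat] :=
      PySem.List.pyGetD_eq_getElem cs (0, 0) h0 (by omega)
    rw [hgeti, hgetm] at hge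
    omega

-- ===== VERDICT (by name: the statement is the Claim_ definition above) =====
theorem rm_nested_segments_spec : Claim_equal_rm_nested_segments := by
  intro segm _hdom hpre
  unfold Pre_rm_nested_segments at hpre
  unfold Spec_rm_nested_segments
  exact pvMain
    (PySem.List.sorted
      ((PySem.List.pyRange 0 ((segm.length : Int) - 1) 2).map
        (fun i => (PySem.List.pyGetD segm i 0, PySem.List.pyGetD segm (i + 1) 0)))
      (fun p => p.1))
    ((PySem.List.sorted_perm _ _ _).nodup_iff.mpr hpre)
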